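-- pv_equiv track=rewrite | github.com/vineykhera/leetcode | funWithPalindrome1.py | getScore2
-- ===== SOURCE A (Python) =====
-- def getScore2(s):
--     n = len(s)
--     LPS = [[0] * n for i in range(n)]
--     for i in range(n):
--         LPS[i][i] = 1
--     for le in range(2, n + 1):
--         for i in range(n - le + 1):
--             j = i + le - 1
--             if le == 2 and s[i] == s[j]:
--                 LPS[i][j] = 2
--             elif s[i] == s[j]:
--                 LPS[i][j] = 2 + LPS[i + 1][j - 1]
--             else:
--                 LPS[i][j] = max(LPS[i + 1][j], LPS[i][j - 1])
--     ans = 0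
--     for i in range(0, n - 1):
--         ans = max(ans, LPS[0][i] * LPS[i + 1][n - 1])
--     return ans
-- ===== SOURCE B (Python) =====
-- def getScore2(s):
--     # Top-down: memoized recursion lps(i, j) = longest palindromic subsequence
--     # length of s[i..j], computed on demand while maximizing lps(0,i)*lps(i+1,n-1).
--     n = len(s)
--     memo = {}
--
--     def lps(i, j):
--         if j < i:
--             return 0
--         v = memo.get((i, j))
--         if v is not None:
--             return v
--         if i == j:
--             v = 1
--         elif s[i] == s[j]:
--             v = 2 + lps(i + 1, j - 1)
--         else:
--             v = max(lps(i + 1, j), lps(i, j - 1))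
--         memo[(i, j)] = v
--         return v
--
--     ans = 0
--     for i in range(n - 1):
--         ans = max(ans, lps(0, i) * lps(i + 1, n - 1))
--     return ans
-- ===== Notes on version B (the rewrite author's own statement) =====
-- stated objective: alternative
-- what changed: Replaces the bottom-up n x n table filled diagonal-by-diagonal (by subrange length) with a top-down memoized recursion lps(i, j) over ranges (dict cache), computed on demand by the loop that maximizes lps(0,i)*lps(i+1,n-1); iterative tabulation becomes recursive decomposition.
import Mathlib
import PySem

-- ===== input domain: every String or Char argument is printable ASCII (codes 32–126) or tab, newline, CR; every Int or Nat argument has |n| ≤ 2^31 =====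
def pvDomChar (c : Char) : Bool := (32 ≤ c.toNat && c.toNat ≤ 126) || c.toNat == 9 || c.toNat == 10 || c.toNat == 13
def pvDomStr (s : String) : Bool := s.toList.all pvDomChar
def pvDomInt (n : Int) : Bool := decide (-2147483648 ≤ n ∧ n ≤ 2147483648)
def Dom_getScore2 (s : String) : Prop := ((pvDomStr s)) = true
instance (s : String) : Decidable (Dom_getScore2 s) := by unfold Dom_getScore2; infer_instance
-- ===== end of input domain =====

-- B replaces A's bottom-up n×n table (filled diagonal-by-diagonal, by subrange length)
-- with top-down memoized recursion lps(i, j) over ranges, computed on demand by the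
-- answer loop; same values, a different (recursive) decomposition of the computation.

-- ===== PORT A =====
-- every index A uses is in range, so the list reads LPS[i][j], s[i] are ported with getD
-- (exact here); LPS[i][j] = v is `rowSetA`, the read is `tgetA`.
def rowSetA (T : List (List Int)) (i j : Nat) (v : Int) : List (List Int) :=
  T.set i ((T.getD i []).set j v)

def tgetA (T : List (List Int)) (i j : Nat) : Int := (T.getD i []).getD j 0

-- the body of `for i in range(n - le + 1)`
def bodyA (c : List Char) (le : Nat) (T : List (List Int)) (i : Nat) : List (List Int) :=
  let j := i + le - 1
  if le = 2 ∧ c.getD i ' ' = c.getD j ' ' then rowSetA T i j 2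
  else if c.getD i ' ' = c.getD j ' ' then rowSetA T i j (2 + tgetA T (i+1) (j-1))
  else rowSetA T i j (max (tgetA T (i+1) j) (tgetA T i (j-1)))

-- the body of `for le in range(2, n + 1)` (2 ≤ le ≤ n, so Nat subtraction is exact)
def lenLoopA (c : List Char) (n : Nat) (T : List (List Int)) (le : Nat) : List (List Int) :=
  (List.range (n - le + 1)).foldl (bodyA c le) T

def getScore2 (s : String) : Int :=
  let c := s.toList
  let n := c.length
  let LPS0 : List (List Int) := (List.range n).map (fun _ => List.replicate n 0)
  let LPS1 := (List.range n).foldl (fun T i => rowSetA T i i 1) LPS0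
  let LPS2 := (List.range' 2 (n - 1)).foldl (lenLoopA c n) LPS1
  (List.range (n - 1)).foldl
    (fun ans i => max ans (tgetA LPS2 0 i * tgetA LPS2 (i+1) (n-1))) 0

-- ===== PORT B =====
-- the memoized recursion `lps(i, j)`: the Python's mutable dict `memo` is threaded
-- through as explicit state (each call returns its value AND the updated memo);
-- the branch order (j < i, memo hit, i == j, s[i] == s[j], else) is the Python's.
def lpsB (c : List Char) (i j : Nat) (m : PySem.Dict (Nat × Nat) Int) :
    Int × PySem.Dict (Nat × Nat) Int :=
  if _h1 : j < i then (0, m)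
  else
    match m.get? (i, j) with
    | some v => (v, m)
    | none =>
      if _h2 : i = j then (1, m.insert (i, j) 1)
      else if c.getD i ' ' = c.getD j ' ' then
        let r := lpsB c (i+1) (j-1) m
        (2 + r.1, r.2.insert (i, j) (2 + r.1))
      else
        let r1 := lpsB c (i+1) j m
        let r2 := lpsB c i (j-1) r1.2
        (max r1.1 r2.1, r2.2.insert (i, j) (max r1.1 r2.1))
termination_by j - i
decreasing_by all_goals omega

-- one iteration of `for i in range(n - 1)` (ans and memo are the loop state)
def stepAlt (c : List Char) (n : Nat) (st : Int × PySem.Dict (Nat × Nat) Int) (i : Nat) :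
    Int × PySem.Dict (Nat × Nat) Int :=
  let p := lpsB c 0 i st.2
  let q := lpsB c (i+1) (n-1) p.2
  (max st.1 (p.1 * q.1), q.2)

def getScore2_alt (s : String) : Int :=
  let c := s.toList
  let n := c.length
  ((List.range (n - 1)).foldl (stepAlt c n) (0, PySem.Dict.empty)).1

-- ===== PRECONDITION & SPEC =====
def Spec_getScore2 (s : String) (out : Int) : Prop := out = getScore2_alt s
instance (s : String) (out : Int) : Decidable (Spec_getScore2 s out) := by unfold Spec_getScore2; infer_instance

-- ===== CLAIM (what is proved, stated in full; the proofs are below) =====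
def Claim_equal_getScore2 : Prop := ∀ (s : String), Dom_getScore2 s → Spec_getScore2 s (getScore2 s)

-- ===== LEMMAS AND PROOFS =====

-- the longest-palindromic-subsequence recurrence both programs compute
def lps (c : List Char) (i j : Nat) : Int :=
  if h1 : j < i then 0
  else if h2 : i = j then 1
  else if c.getD i ' ' = c.getD j ' ' then 2 + lps c (i+1) (j-1)
  else max (lps c (i+1) j) (lps c i (j-1))
termination_by j - i
decreasing_by all_goals omega

-- unfolding equations for lps
theorem lps_of_lt (c : List Char) {i j : Nat} (h : j < i) : lps c i j = 0 := by
  rw [lps]; simp [h]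

theorem lps_diag (c : List Char) (i : Nat) : lps c i i = 1 := by
  rw [lps]; simp

theorem lps_step (c : List Char) {i j : Nat} (h : i < j) :
    lps c i j = if c.getD i ' ' = c.getD j ' ' then 2 + lps c (i+1) (j-1)
                else max (lps c (i+1) j) (lps c i (j-1)) := by
  rw [lps]
  have h1 : ¬ j < i := by omega
  have h2 : i ≠ j := by omega
  simp [h1, h2]

-- getD-after-set facts used throughout
theorem getD_set_self {α : Type} (l : List α) (i : Nat) (v d : α) (h : i < l.length) :
    (l.set i v).getD i d = v := by
  simp [List.getD_eq_getElem?_getD, h]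

theorem getD_set_ne {α : Type} (l : List α) {i j : Nat} (v d : α) (h : i ≠ j) :
    (l.set i v).getD j d = l.getD j d := by
  simp [List.getD_eq_getElem?_getD, List.getElem?_set_ne h]

theorem getD_replicate {α : Type} (n i : Nat) (x d : α) :
    (List.replicate n x).getD i d = if i < n then x else d := by
  rw [List.getD_eq_getElem?_getD, List.getElem?_replicate]
  split <;> rfl

theorem getD_replicate_zero (n i : Nat) : (List.replicate n (0 : Int)).getD i 0 = 0 := by
  rw [getD_replicate]
  split <;> rfl

-- ---------- A-side invariants ----------

-- the table always stays an n × n grid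
def ShapeA (n : Nat) (T : List (List Int)) : Prop :=
  T.length = n ∧ ∀ i, i < n → (T.getD i []).length = n

theorem shapeA_rowSet {n : Nat} {T : List (List Int)} (h : ShapeA n T) (i j : Nat) (v : Int) :
    ShapeA n (rowSetA T i j v) := by
  obtain ⟨hl, hr⟩ := h
  refine ⟨by simp [rowSetA, hl], fun a ha => ?_⟩
  by_cases hai : i = a
  · subst hai
    rw [rowSetA, getD_set_self _ _ _ _ (by omega), List.length_set]
    exact hr i ha
  · rw [rowSetA, getD_set_ne _ _ _ hai]
    exact hr a ha

theorem tgetA_rowSet {n : Nat} {T : List (List Int)} (h : ShapeA n T) {i j : Nat}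
    (hi : i < n) (hj : j < n) (v : Int) (a b : Nat) :
    tgetA (rowSetA T i j v) a b = if a = i ∧ b = j then v else tgetA T a b := by
  obtain ⟨hl, hr⟩ := h
  by_cases hai : i = a
  · subst hai
    rw [tgetA, rowSetA, getD_set_self _ _ _ _ (by omega)]
    by_cases hbj : j = b
    · subst hbj
      rw [getD_set_self _ _ _ _ (by rw [hr i hi]; omega)]
      simp
    · rw [getD_set_ne _ _ _ hbj, if_neg (by tauto)]
      rfl
  · rw [tgetA, rowSetA, getD_set_ne _ _ _ hai, if_neg (by tauto)]
    rfl

-- after processing all lengths ≤ L: entries of width ≤ L hold lps, the rest are 0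
def InvA (c : List Char) (n L : Nat) (T : List (List Int)) : Prop :=
  ShapeA n T ∧ ∀ a b, a < n → b < n → tgetA T a b = if b < a + L then lps c a b else 0

-- after processing rows < k of the inner loop for width le
def QA (c : List Char) (n le k : Nat) (T : List (List Int)) : Prop :=
  ShapeA n T ∧ ∀ a b, a < n → b < n →
    tgetA T a b = if b + 1 < a + le ∨ (a < k ∧ b + 1 = a + le) then lps c a b else 0

theorem QA_zero {c : List Char} {n le : Nat} {T : List (List Int)} (h2 : 2 ≤ le)
    (h : InvA c n (le - 1) T) : QA c n le 0 T := by
  refine ⟨h.1, fun a b ha hb => ?_⟩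
  rw [h.2 a b ha hb]
  exact if_congr (by omega) rfl rfl

theorem QA_step {c : List Char} {n le k : Nat} {T : List (List Int)} (h2 : 2 ≤ le)
    (hk : k + le ≤ n) (hq : QA c n le k T) : QA c n le (k + 1) (bodyA c le T k) := by
  obtain ⟨hsh, hent⟩ := hq
  have hkn : k < n := by omega
  have hjn : k + le - 1 < n := by omega
  have hkj : k < k + le - 1 := by omega
  have hval : ∀ v : Int, v = lps c k (k + le - 1) → QA c n le (k + 1) (rowSetA T k (k + le - 1) v) := by
    intro v hv
    refine ⟨shapeA_rowSet ⟨hsh.1, hsh.2⟩ _ _ _, fun a b ha hb => ?_⟩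
    rw [tgetA_rowSet ⟨hsh.1, hsh.2⟩ hkn hjn v a b]
    by_cases hab : a = k ∧ b = k + le - 1
    · obtain ⟨rfl, rfl⟩ := hab
      rw [if_pos ⟨rfl, rfl⟩, if_pos (by omega), hv]
    · rw [if_neg hab, hent a b ha hb]
      exact if_congr (by omega) rfl rfl
  simp only [bodyA]
  by_cases hc : c.getD k ' ' = c.getD (k + le - 1) ' '
  · by_cases hle2 : le = 2
    · rw [if_pos ⟨hle2, hc⟩]
      refine hval 2 ?_
      rw [lps_step c hkj, if_pos hc, lps_of_lt c (by omega)]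
      ring
    · rw [if_neg (by tauto), if_pos hc]
      refine hval _ ?_
      have h3 : 3 ≤ le := by omega
      rw [hent (k+1) (k + le - 1 - 1) (by omega) (by omega), if_pos (by omega),
        lps_step c hkj, if_pos hc]
  · rw [if_neg (by tauto), if_neg hc]
    refine hval _ ?_
    rw [hent (k+1) (k + le - 1) (by omega) hjn, if_pos (by omega),
      hent k (k + le - 1 - 1) hkn (by omega), if_pos (by omega),
      lps_step c hkj, if_neg hc]

theorem QA_foldl {c : List Char} {n le : Nat} {T : List (List Int)} (h2 : 2 ≤ le)
    (hq : QA c n le 0 T) :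
    ∀ k, k + le ≤ n + 1 → QA c n le k ((List.range k).foldl (bodyA c le) T) := by
  intro k
  induction k with
  | zero => intro _; simpa using hq
  | succ m ih =>
    intro hm
    rw [List.range_succ, List.foldl_append]
    exact QA_step h2 (by omega) (ih (by omega))

theorem lenLoopA_inv {c : List Char} {n le : Nat} {T : List (List Int)} (h2 : 2 ≤ le)
    (hle : le ≤ n) (h : InvA c n (le - 1) T) : InvA c n le (lenLoopA c n T le) := by
  have hq := QA_foldl h2 (QA_zero h2 h) (n - le + 1) (by omega)
  rw [lenLoopA]
  refine ⟨hq.1, fun a b ha hb => ?_⟩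
  rw [hq.2 a b ha hb]
  exact if_congr (by omega) rfl rfl

theorem shapeA_zero (n : Nat) :
    ShapeA n ((List.range n).map (fun _ => List.replicate n (0 : Int))) ∧
      ∀ a b, tgetA ((List.range n).map (fun _ => List.replicate n (0 : Int))) a b = 0 := by
  have hrep : (List.range n).map (fun _ => List.replicate n (0 : Int))
      = List.replicate n (List.replicate n (0 : Int)) := by
    rw [List.map_const']
    simp
  rw [hrep]
  refine ⟨⟨by simp, fun i hi => ?_⟩, fun a b => ?_⟩
  · rw [getD_replicate, if_pos hi]
    simp
  · rw [tgetA, getD_replicate]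
    split
    · exact getD_replicate_zero n b
    · rfl

theorem diag_foldl (n : Nat) :
    ∀ k, k ≤ n →
      ShapeA n ((List.range k).foldl (fun T i => rowSetA T i i 1)
          ((List.range n).map (fun _ => List.replicate n (0 : Int)))) ∧
      ∀ a b, a < n → b < n →
        tgetA ((List.range k).foldl (fun T i => rowSetA T i i 1)
            ((List.range n).map (fun _ => List.replicate n (0 : Int)))) a b
          = if a = b ∧ a < k then 1 else 0 := by
  intro k
  induction k with
  | zero =>
    intro _
    simp only [List.range_zero, List.foldl_nil]
    exact ⟨(shapeA_zero n).1, fun a b _ _ => by rw [(shapeA_zero n).2 a b]; simp⟩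
  | succ m ih =>
    intro hm
    obtain ⟨hsh, hent⟩ := ih (by omega)
    rw [List.range_succ, List.foldl_append]
    simp only [List.foldl_cons, List.foldl_nil]
    refine ⟨shapeA_rowSet hsh _ _ _, fun a b ha hb => ?_⟩
    rw [tgetA_rowSet hsh (by omega) (by omega) 1 a b]
    by_cases hab : a = m ∧ b = m
    · obtain ⟨rfl, rfl⟩ := hab
      rw [if_pos ⟨rfl, rfl⟩, if_pos (by omega)]
    · rw [if_neg hab, hent a b ha hb]
      exact if_congr (by omega) rfl rfl

theorem InvA_one (c : List Char) (n : Nat) :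
    InvA c n 1 ((List.range n).foldl (fun T i => rowSetA T i i 1)
      ((List.range n).map (fun _ => List.replicate n (0 : Int)))) := by
  obtain ⟨hsh, hent⟩ := diag_foldl n n (le_refl n)
  refine ⟨hsh, fun a b ha hb => ?_⟩
  rw [hent a b ha hb]
  by_cases hab : a = b
  · subst hab
    rw [if_pos ⟨rfl, ha⟩, if_pos (by omega), lps_diag]
  · rw [if_neg (by tauto)]
    by_cases hba : b < a
    · rw [if_pos (by omega), lps_of_lt c hba]
    · rw [if_neg (by omega)]

theorem outerA {c : List Char} {n : Nat} {T : List (List Int)} (h1 : InvA c n 1 T) :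
    ∀ m, m ≤ n - 1 → InvA c n (m + 1) ((List.range' 2 m).foldl (lenLoopA c n) T) := by
  intro m
  induction m with
  | zero => intro _; simpa using h1
  | succ p ih =>
    intro hp
    rw [List.range'_1_concat, List.foldl_append]
    simp only [List.foldl_cons, List.foldl_nil]
    have hpn : (2 + p) - 1 = p + 1 := by omega
    have hInv : InvA c n ((2 + p) - 1) ((List.range' 2 p).foldl (lenLoopA c n) T) := by
      rw [hpn]; exact ih (by omega)
    have h := lenLoopA_inv (by omega : 2 ≤ 2 + p) (by omega : 2 + p ≤ n) hInv
    have he : 2 + p = p + 1 + 1 := by omega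
    rwa [he] at h hInv ⊢

-- A computes the canonical fold over lps values
theorem getScore2_eq (s : String) :
    getScore2 s = (List.range (s.toList.length - 1)).foldl
      (fun ans i => max ans (lps s.toList 0 i * lps s.toList (i+1) (s.toList.length - 1))) 0 := by
  simp only [getScore2]
  have hInv := outerA (InvA_one s.toList s.toList.length) (s.toList.length - 1) (le_refl _)
  apply List.foldl_ext
  intro acc i hi
  rw [List.mem_range] at hi
  rw [hInv.2 0 i (by omega) (by omega), if_pos (by omega),
    hInv.2 (i+1) (s.toList.length - 1) (by omega) (by omega), if_pos (by omega)]

-- ---------- B-side invariants ----------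

-- every entry the memo holds is a true lps value
def MemoOK (c : List Char) (m : PySem.Dict (Nat × Nat) Int) : Prop :=
  ∀ a b v, m.get? (a, b) = some v → v = lps c a b

theorem memoOK_empty (c : List Char) : MemoOK c PySem.Dict.empty := by
  intro a b v h
  rw [PySem.Dict.get?_empty] at h
  exact absurd h (by simp)

theorem memoOK_insert {c : List Char} {m : PySem.Dict (Nat × Nat) Int} (h : MemoOK c m)
    (i j : Nat) (v : Int) (hv : v = lps c i j) : MemoOK c (m.insert (i, j) v) := by
  intro a b w hw
  rw [PySem.Dict.get?_insert] at hw
  by_cases hab : (a, b) = ((i, j) : Nat × Nat)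
  · rw [if_pos hab] at hw
    cases hw
    cases hab
    exact hv
  · rw [if_neg hab] at hw
    exact h a b w hw

-- the memoized recursion returns the lps value and keeps the memo correct
theorem lpsB_correct (c : List Char) :
    ∀ i j m, MemoOK c m → (lpsB c i j m).1 = lps c i j ∧ MemoOK c (lpsB c i j m).2 := by
  intro i j
  induction hd : j - i using Nat.strong_induction_on generalizing i j with
  | _ d ih =>
    intro m hm
    rw [lpsB]
    by_cases h1 : j < i
    · simp only [dif_pos h1]
      exact ⟨(lps_of_lt c h1).symm, hm⟩
    · simp only [dif_neg h1]
      cases hget : m.get? (i, j) with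
      | some v =>
        exact ⟨hm _ _ _ hget, hm⟩
      | none =>
        by_cases h2 : i = j
        · rw [dif_pos h2]
          subst h2
          exact ⟨(lps_diag c i).symm, memoOK_insert hm i i 1 (lps_diag c i).symm⟩
        · simp only [dif_neg h2]
          have hij : i < j := by omega
          by_cases hc : c.getD i ' ' = c.getD j ' '
          · rw [if_pos hc]
            have hr := ih (j - 1 - (i + 1)) (by omega) (i+1) (j-1) rfl m hm
            have hv : 2 + (lpsB c (i+1) (j-1) m).1 = lps c i j := by
              rw [hr.1, lps_step c hij, if_pos hc]
            exact ⟨hv, memoOK_insert hr.2 i j _ hv⟩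
          · rw [if_neg hc]
            have hr1 := ih (j - (i + 1)) (by omega) (i+1) j rfl m hm
            have hr2 := ih (j - 1 - i) (by omega) i (j-1) rfl _ hr1.2
            have hv : max (lpsB c (i+1) j m).1 (lpsB c i (j-1) (lpsB c (i+1) j m).2).1
                = lps c i j := by
              rw [hr1.1, hr2.1, lps_step c hij, if_neg hc]
            exact ⟨hv, memoOK_insert hr2.2 i j _ hv⟩

-- the answer loop: the memo component never changes the accumulated maxima
theorem foldl_stepAlt (c : List Char) (n : Nat) :
    ∀ (l : List Nat) (acc : Int) (m : PySem.Dict (Nat × Nat) Int), MemoOK c m →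
      (l.foldl (stepAlt c n) (acc, m)).1
        = l.foldl (fun ans i => max ans (lps c 0 i * lps c (i+1) (n-1))) acc := by
  intro l
  induction l with
  | nil => intro acc m _; rfl
  | cons x xs ih =>
    intro acc m hm
    simp only [List.foldl_cons]
    have hp := lpsB_correct c 0 x m hm
    have hq := lpsB_correct c (x+1) (n-1) _ hp.2
    rw [show stepAlt c n (acc, m) x
        = (max acc ((lpsB c 0 x m).1 * (lpsB c (x+1) (n-1) (lpsB c 0 x m).2).1),
           (lpsB c (x+1) (n-1) (lpsB c 0 x m).2).2) from rfl]
    rw [ih _ _ hq.2, hp.1, hq.1]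

-- B computes the same canonical fold over lps values
theorem getScore2_alt_eq (s : String) :
    getScore2_alt s = (List.range (s.toList.length - 1)).foldl
      (fun ans i => max ans (lps s.toList 0 i * lps s.toList (i+1) (s.toList.length - 1))) 0 := by
  simp only [getScore2_alt]
  exact foldl_stepAlt s.toList s.toList.length _ 0 _ (memoOK_empty s.toList)

-- ===== VERDICT (by name: the statement is the Claim_ definition above) =====
theorem getScore2_spec : Claim_equal_getScore2 := by
  intro s _
  unfold Spec_getScore2
  rw [getScore2_eq, getScore2_alt_eq]
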